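-- pv_equiv track=rewrite | github.com/Jian-Nam/Algorithm | 프로그래머스/4/49995. 쿠키 구입/쿠키 구입.py | solution
-- ===== SOURCE A (Python) =====
-- def solution(cookie):
--     cum = [0]
--
--     tmp = 0
--     for c in cookie:
--         tmp += c
--         cum.append(tmp)
--
--     posible_max = cum[-1] // 2
--
--     maximum = 0
--
--     # 해당 인덱스 이전까지의 합
--     for mid, mid_cum in enumerate(cum):
--         start, end = mid-1, mid+1 # left: mid-1, right: mid
--         while(start >= 0 and end < len(cum)):
--             left = cum[mid] - cum[start] # cookie start 이상 mid 미만
--             right = cum[end] - cum[mid] # cookie mid 이상 end 미만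
--             if(left > posible_max or right > posible_max):
--                 break
--             if(left == right):
--                 maximum = left if left > maximum else maximum
--                 start -= 1
--             elif(left > right):
--                 end += 1
--             else:
--                 start -= 1
--
--     return maximum
-- ===== SOURCE B (Python) =====
-- def solution(cookie):
--     cum = [0]
--     for c in cookie:
--         cum.append(cum[-1] + c)
--     best = 0
--     for mid in range(len(cum)):
--         left = {cum[mid] - cum[a] for a in range(mid)}
--         right = {cum[c] - cum[mid] for c in range(mid + 1, len(cum))}
--         for v in left & right:
--             if v > best:
--                 best = v
--     return best
-- ===== Notes on version B (the rewrite author's own statement) =====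
-- stated objective: alternative
-- what changed: The monotonic two-pointer walk around each meeting index is removed entirely: B builds, for every meeting index, the set of left segment sums and the set of right segment sums, intersects them, and takes the running maximum over the intersection (no pointers, no three-way comparison, no total//2 limit, which is automatic for nonnegative cookies).
-- outside the precondition, e.g. on solution([-2, 1, 1]): A returns 0, B returns 1
import Mathlib
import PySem

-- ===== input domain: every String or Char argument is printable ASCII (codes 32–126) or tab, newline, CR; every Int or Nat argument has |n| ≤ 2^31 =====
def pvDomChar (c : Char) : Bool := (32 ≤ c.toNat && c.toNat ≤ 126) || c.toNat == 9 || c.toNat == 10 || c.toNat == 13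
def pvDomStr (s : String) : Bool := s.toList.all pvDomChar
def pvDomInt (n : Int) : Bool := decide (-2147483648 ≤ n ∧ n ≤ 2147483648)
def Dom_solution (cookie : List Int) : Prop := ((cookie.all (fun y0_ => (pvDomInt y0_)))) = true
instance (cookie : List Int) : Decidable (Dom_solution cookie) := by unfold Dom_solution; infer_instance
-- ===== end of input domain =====

-- B replaces A's per-mid monotonic two-pointer walk by per-mid set intersection of left and
-- right segment-sum sets with a running maximum (objective: alternative algorithm); equivalence
-- is proved on Pre_: nonnegative cookie counts (the natural domain), plus any list admitting no
-- equal adjacent-segment split (both return 0 there).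


-- ===== PORT A =====
-- cum = [0]; tmp accumulator; append tmp after each cookie
def pyCum (cookie : List Int) : List Int :=
  (cookie.foldl (fun (st : List Int × Int) c => (st.1 ++ [st.2 + c], st.2 + c)) ([0], 0)).1

-- A's inner `while(start >= 0 and end < len(cum))` loop, fuel-bounded
def innerA (cum : List Int) (pm : Int) (mid : Int) : Nat → Int → Int → Int → Int
  | 0, _, _, m => m
  | fuel+1, start, e, m =>
    if 0 ≤ start ∧ e < (cum.length : Int) then
      let left := PySem.List.pyGetD cum mid 0 - PySem.List.pyGetD cum start 0
      let right := PySem.List.pyGetD cum e 0 - PySem.List.pyGetD cum mid 0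
      if left > pm ∨ right > pm then m
      else if left = right then innerA cum pm mid fuel (start-1) e (if left > m then left else m)
      else if left > right then innerA cum pm mid fuel start (e+1) m
      else innerA cum pm mid fuel (start-1) e m
    else m

def solution (cookie : List Int) : Int :=
  let cum := pyCum cookie
  let pm := PySem.Int.floordiv ((PySem.List.pyGet? cum (-1)).getD 0) 2
  (PySem.List.enumerate cum 0).foldl
    (fun m p => innerA cum pm p.1 cum.length (p.1 - 1) (p.1 + 1) m) 0

-- ===== PORT B =====
-- cum = [0]; each step appends (last element + c)
def pyCumB (cookie : List Int) : List Int :=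
  cookie.foldl (fun l c => l ++ [(PySem.List.pyGet? l (-1)).getD 0 + c]) [0]

-- per mid: left = {cum[mid]-cum[a] for a in range(mid)}, right = {cum[c]-cum[mid] for c in
-- range(mid+1, len(cum))}; running max over left & right (max is iteration-order independent,
-- so iterating the intersection in left's insertion order is exact)
def solution_alt (cookie : List Int) : Int :=
  let cum := pyCumB cookie
  (List.range cum.length).foldl
    (fun best mid =>
      let left := PySem.Set.ofList ((List.range mid).map
        (fun (a : Nat) => PySem.List.pyGetD cum (mid : Int) 0 - PySem.List.pyGetD cum (a : Int) 0))
      let right := PySem.Set.ofList ((PySem.List.pyRange ((mid : Int) + 1) (cum.length : Int)).map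
        (fun c => PySem.List.pyGetD cum c 0 - PySem.List.pyGetD cum (mid : Int) 0))
      (PySem.Set.inter left right).foldl (fun b v => if v > b then v else b) best) 0

-- ===== PRECONDITION & SPEC =====
-- Pre_ excludes exactly the lists with a negative entry that admit an equal adjacent-segment
-- split: outside the natural nonnegative domain the prefix sums are not monotone and A's
-- two-pointer walk may miss such a split (e.g. [-2, 1, 1]); lists admitting no split are kept
-- (both programs return 0 there).
def Pre_solution (cookie : List Int) : Prop :=
  (∀ c ∈ cookie, 0 ≤ c) ∨
  (∀ c < cookie.length + 1, ∀ m < c, ∀ a < m,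
    (cookie.take m).sum - (cookie.take a).sum ≠ (cookie.take c).sum - (cookie.take m).sum)
instance (cookie : List Int) : Decidable (Pre_solution cookie) := by unfold Pre_solution; infer_instance
def pvWitness_solution : List Int := [1, 1, 2]
def Spec_solution (cookie : List Int) (out : Int) : Prop := out = solution_alt cookie
instance (cookie : List Int) (out : Int) : Decidable (Spec_solution cookie out) := by unfold Spec_solution; infer_instance

-- ===== CLAIM =====
def Claim_equal_solution : Prop := ∀ (cookie : List Int), Dom_solution cookie → Pre_solution cookie → Spec_solution cookie (solution cookie)

-- ===== LEMMAS AND PROOFS =====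

-- both prefix-list constructions produce the same list
lemma build_eq (cs : List Int) : ∀ (l : List Int) (t : Int), l.getLast? = some t →
    cs.foldl (fun l c => l ++ [(PySem.List.pyGet? l (-1)).getD 0 + c]) l
      = (cs.foldl (fun (st : List Int × Int) c => (st.1 ++ [st.2 + c], st.2 + c)) (l, t)).1 := by
  induction cs with
  | nil => intro l t _; rfl
  | cons c cs ih =>
    intro l t hlast
    rw [List.foldl_cons, List.foldl_cons]
    rw [PySem.List.pyGet?_neg_one, hlast]
    exact ih (l ++ [t + c]) (t + c) (by rw [List.getLast?_concat])

lemma pyCumB_eq (cookie : List Int) : pyCumB cookie = pyCum cookie := by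
  unfold pyCumB pyCum
  exact build_eq cookie [0] 0 rfl

-- prefix sums, as a function
def pfx (cookie : List Int) (i : Nat) : Int := (cookie.take i).sum

lemma pyCum_go (cs : List Int) : ∀ (l : List Int) (t : Int),
    (cs.foldl (fun (st : List Int × Int) c => (st.1 ++ [st.2 + c], st.2 + c)) (l, t)).1
      = l ++ (List.range cs.length).map (fun i => t + (cs.take (i+1)).sum) := by
  induction cs with
  | nil => intro l t; simp
  | cons c cs ih =>
    intro l t
    rw [List.foldl_cons, ih]
    rw [List.append_assoc]
    congr 1
    rw [List.length_cons, List.range_succ_eq_map, List.map_cons, List.map_map,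
      List.singleton_append]
    congr 1
    · simp
    · congr 1
      funext i
      simp [List.take_succ_cons]
      ring

lemma pyCum_eq (cookie : List Int) :
    pyCum cookie = (List.range (cookie.length + 1)).map (pfx cookie) := by
  unfold pyCum
  rw [pyCum_go]
  rw [List.range_succ_eq_map, List.map_cons, List.map_map]
  simp [pfx]

lemma cum_length (cookie : List Int) : (pyCum cookie).length = cookie.length + 1 := by
  rw [pyCum_eq]; simp

lemma cum_getD (cookie : List Int) (i : Nat) (h : i < cookie.length + 1) :
    (pyCum cookie).getD i 0 = pfx cookie i := by
  rw [pyCum_eq]; exact PySem.List.getD_map_range _ _ _ _ h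

lemma cum_last (cookie : List Int) :
    (PySem.List.pyGet? (pyCum cookie) (-1)).getD 0 = pfx cookie cookie.length := by
  rw [PySem.List.pyGet?_neg_one, pyCum_eq]
  rw [List.getLast?_eq_getElem?]
  simp

lemma pfx_nonneg (cookie : List Int) (h : ∀ c ∈ cookie, 0 ≤ c) (i : Nat) :
    0 ≤ pfx cookie i :=
  List.sum_nonneg (fun x hx => h x (List.mem_of_mem_take hx))

lemma pfx_mono (cookie : List Int) (h : ∀ c ∈ cookie, 0 ≤ c) {i j : Nat} (hij : i ≤ j) :
    pfx cookie i ≤ pfx cookie j := by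
  have hj : cookie.take j = cookie.take i ++ (cookie.drop i).take (j - i) := by
    rw [← List.take_add]; congr 1; omega
  have h0 : 0 ≤ ((cookie.drop i).take (j - i)).sum :=
    List.sum_nonneg (fun x hx => h x (List.mem_of_mem_drop (List.mem_of_mem_take hx)))
  unfold pfx
  rw [hj, List.sum_append]
  linarith

lemma cum_mono (cookie : List Int) (h : ∀ c ∈ cookie, 0 ≤ c) (i j : Nat) (hij : i ≤ j)
    (hj : j < (pyCum cookie).length) :
    (pyCum cookie).getD i 0 ≤ (pyCum cookie).getD j 0 := by
  rw [cum_length] at hj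
  rw [cum_getD _ _ (by omega), cum_getD _ _ hj]
  exact pfx_mono cookie h hij

-- any matched value is at most total // 2
lemma cum_pm (cookie : List Int) (h : ∀ c ∈ cookie, 0 ≤ c) (a mid c : Nat)
    (ha : a < mid) (hc : mid < c) (hcn : c < (pyCum cookie).length)
    (heq : (pyCum cookie).getD mid 0 - (pyCum cookie).getD a 0
         = (pyCum cookie).getD c 0 - (pyCum cookie).getD mid 0) :
    (pyCum cookie).getD mid 0 - (pyCum cookie).getD a 0
      ≤ PySem.Int.floordiv ((PySem.List.pyGet? (pyCum cookie) (-1)).getD 0) 2 := by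
  rw [cum_length] at hcn
  rw [cum_getD _ _ (by omega), cum_getD _ _ (by omega)] at heq ⊢
  rw [cum_getD _ _ (by omega)] at heq
  rw [cum_last, PySem.Int.floordiv_eq_ediv_of_pos (by norm_num)]
  have h1 : pfx cookie c ≤ pfx cookie cookie.length := pfx_mono cookie h (by omega)
  have h2 : 0 ≤ pfx cookie a := pfx_nonneg cookie h a
  omega

-- the set of matched segment-sum values seen from boundaries (a < S, E ≤ c < len)
def matchList (cum : List Int) (mid S E : Nat) : List Int :=
  (List.range S).flatMap (fun a =>
    (List.range' E (cum.length - E)).filterMap (fun c =>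
      if cum.getD mid 0 - cum.getD a 0 = cum.getD c 0 - cum.getD mid 0
      then some (cum.getD mid 0 - cum.getD a 0) else none))

lemma mem_matchList (cum : List Int) (mid S E : Nat) (hE : E ≤ cum.length) (v : Int) :
    v ∈ matchList cum mid S E ↔ ∃ a, a < S ∧ ∃ c, E ≤ c ∧ c < cum.length ∧
      cum.getD mid 0 - cum.getD a 0 = cum.getD c 0 - cum.getD mid 0 ∧
      v = cum.getD mid 0 - cum.getD a 0 := by
  simp only [matchList, List.mem_flatMap, List.mem_filterMap, List.mem_range, List.mem_range'_1]
  constructor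
  · rintro ⟨a, ha, c, ⟨hc1, hc2⟩, hv⟩
    split_ifs at hv with hmatch
    · exact ⟨a, ha, c, hc1, by omega, hmatch, (Option.some_inj.mp hv).symm⟩
  · rintro ⟨a, ha, c, hc1, hc2, heq, rfl⟩
    exact ⟨a, ha, c, ⟨hc1, by omega⟩, by rw [if_pos heq]⟩

lemma matchList_zero (cum : List Int) (mid E : Nat) : matchList cum mid 0 E = [] := by
  simp [matchList]

lemma matchList_end (cum : List Int) (mid S : Nat) : matchList cum mid S cum.length = [] := by
  simp [matchList]

lemma foldMax_le (l : List Int) (m b : Int) (hm : m ≤ b) (h : ∀ w ∈ l, w ≤ b) :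
    l.foldl max m ≤ b := by
  rcases PySem.List.foldl_max_mem l m with h1 | h1
  · rw [h1]; exact hm
  · exact h _ h1

lemma foldMax_congr (l1 l2 : List Int) (m : Int) (h : ∀ x, x ∈ l1 ↔ x ∈ l2) :
    l1.foldl max m = l2.foldl max m :=
  le_antisymm
    (foldMax_le _ _ _ (PySem.List.le_foldl_max l2 m).1
      (fun w hw => (PySem.List.le_foldl_max l2 m).2 w ((h w).1 hw)))
    (foldMax_le _ _ _ (PySem.List.le_foldl_max l1 m).1
      (fun w hw => (PySem.List.le_foldl_max l1 m).2 w ((h w).2 hw)))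

lemma foldMax_extract (l1 l2 : List Int) (m v : Int)
    (h1 : ∀ w ∈ l1, w ∈ l2 ∨ w = v) (h2 : v ∈ l1) (h3 : ∀ w ∈ l2, w ∈ l1) :
    l1.foldl max m = l2.foldl max (max m v) := by
  apply le_antisymm
  · apply foldMax_le
    · exact le_trans (le_max_left m v) (PySem.List.le_foldl_max l2 (max m v)).1
    · intro w hw
      rcases h1 w hw with h | hwv
      · exact (PySem.List.le_foldl_max _ _).2 w h
      · rw [hwv]; exact le_trans (le_max_right m v) (PySem.List.le_foldl_max _ _).1
  · apply foldMax_le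
    · exact max_le (PySem.List.le_foldl_max l1 m).1 ((PySem.List.le_foldl_max l1 m).2 v h2)
    · intro w hw
      exact (PySem.List.le_foldl_max l1 m).2 w (h3 w hw)

lemma ite_gt_eq_max (b v : Int) : (if v > b then v else b) = max b v := by
  rw [max_def]; split_ifs <;> omega

-- A's two-pointer walk computes the running max over the full match set
lemma walkA (cum : List Int) (pm : Int) (mid : Nat)
    (hmono : ∀ i j : Nat, i ≤ j → j < cum.length → cum.getD i 0 ≤ cum.getD j 0)
    (hpm : ∀ a c : Nat, a < mid → mid < c → c < cum.length →
        cum.getD mid 0 - cum.getD a 0 = cum.getD c 0 - cum.getD mid 0 →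
        cum.getD mid 0 - cum.getD a 0 ≤ pm) :
    ∀ (fuel : Nat) (s e m : Int),
      -1 ≤ s → s ≤ (mid : Int) - 1 → (mid : Int) + 1 ≤ e → e ≤ (cum.length : Int) →
      (s + 1) + ((cum.length : Int) - e) ≤ (fuel : Int) →
      innerA cum pm (mid : Int) fuel s e m
        = (matchList cum mid (s + 1).toNat e.toNat).foldl max m := by
  intro fuel
  induction fuel with
  | zero =>
    intro s e m hs1 hs2 he1 he2 hfuel
    have hs : s = -1 := by omega
    have he : e = (cum.length : Int) := by omega
    subst hs he
    rw [show ((-1 : Int) + 1).toNat = 0 by rfl, matchList_zero]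
    rfl
  | succ fuel ih =>
    intro s e m hs1 hs2 he1 he2 hfuel
    rw [innerA]
    by_cases hcond : 0 ≤ s ∧ e < (cum.length : Int)
    · obtain ⟨hs0, hen⟩ := hcond
      rw [if_pos ⟨hs0, hen⟩]
      obtain ⟨S, rfl⟩ : ∃ S : Nat, s = (S : Int) := ⟨s.toNat, by omega⟩
      obtain ⟨E, rfl⟩ : ∃ E : Nat, e = (E : Int) := ⟨e.toNat, by omega⟩
      have hEle : E ≤ cum.length := by omega
      have hEn : E < cum.length := by omega
      have hSmid : S < mid := by omega
      have hmidE : mid < E := by omega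
      rw [PySem.List.pyGetD_natCast, PySem.List.pyGetD_natCast, PySem.List.pyGetD_natCast]
      dsimp only
      set L := cum.getD mid 0 - cum.getD S 0 with hL
      set R := cum.getD E 0 - cum.getD mid 0 with hR
      have hstep : ((S : Int) + 1).toNat = S + 1 := by omega
      have hEstep : ((E : Int)).toNat = E := by omega
      rw [hstep, hEstep]
      by_cases hbreak : L > pm ∨ R > pm
      · rw [if_pos hbreak]
        rw [foldMax_congr _ [] m ?_]
        · rfl
        · intro x
          simp only [List.not_mem_nil, iff_false]
          intro hx
          rw [mem_matchList _ _ _ _ hEle] at hx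
          obtain ⟨a, ha, c, hc1, hc2, heq, rfl⟩ := hx
          have hval := hpm a c (by omega) (by omega) hc2 heq
          rcases hbreak with hb | hb
          · have hmA := hmono a S (by omega) (by omega)
            omega
          · have hmC := hmono E c hc1 hc2
            omega
      · rw [if_neg hbreak]
        rw [not_or] at hbreak
        obtain ⟨hLpm, hRpm⟩ := hbreak
        by_cases heq : L = R
        · rw [if_pos heq]
          have h1 := ih ((S : Int) - 1) (E : Int) (if L > m then L else m)
            (by omega) (by omega) he1 he2 (by omega)
          rw [h1, show ((S : Int) - 1 + 1).toNat = S by omega, hEstep]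
          rw [ite_gt_eq_max]
          refine (foldMax_extract _ _ m L ?_ ?_ ?_).symm
          · intro w hw
            rw [mem_matchList _ _ _ _ hEle] at hw
            obtain ⟨a, ha, c, hc1, hc2, heqq, rfl⟩ := hw
            by_cases haS : a < S
            · left; rw [mem_matchList _ _ _ _ hEle]; exact ⟨a, haS, c, hc1, hc2, heqq, rfl⟩
            · right; have : a = S := by omega
              subst this; rfl
          · rw [mem_matchList _ _ _ _ hEle]
            exact ⟨S, by omega, E, le_refl _, hEn, by rw [← hL, ← hR]; exact heq, rfl⟩
          · intro w hw
            rw [mem_matchList _ _ _ _ hEle] at hw ⊢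
            obtain ⟨a, ha, c, hc⟩ := hw
            exact ⟨a, by omega, c, hc⟩
        · rw [if_neg heq]
          by_cases hgt : L > R
          · rw [if_pos hgt]
            have h1 := ih (S : Int) ((E : Int) + 1) m hs1 hs2 (by omega) (by omega) (by omega)
            rw [h1, hstep, show ((E : Int) + 1).toNat = E + 1 by omega]
            apply foldMax_congr
            intro x
            rw [mem_matchList _ _ _ _ hEle, mem_matchList _ _ _ _ (by omega)]
            constructor
            · rintro ⟨a, ha, c, hc1, hc2, heqq, rfl⟩
              exact ⟨a, ha, c, by omega, hc2, heqq, rfl⟩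
            · rintro ⟨a, ha, c, hc1, hc2, heqq, rfl⟩
              refine ⟨a, ha, c, ?_, hc2, heqq, rfl⟩
              rcases Nat.eq_or_lt_of_le hc1 with hce | hce
              · exfalso
                have hmA := hmono a S (by omega) (by omega)
                rw [← hce] at heqq
                omega
              · omega
          · rw [if_neg hgt]
            have hlt : L < R := by omega
            have h1 := ih ((S : Int) - 1) (E : Int) m (by omega) (by omega) he1 he2 (by omega)
            rw [h1, show ((S : Int) - 1 + 1).toNat = S by omega, hEstep]
            apply foldMax_congr
            intro x
            rw [mem_matchList _ _ _ _ hEle, mem_matchList _ _ _ _ hEle]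
            constructor
            · rintro ⟨a, ha, c, hc⟩
              exact ⟨a, by omega, c, hc⟩
            · rintro ⟨a, ha, c, hc1, hc2, heqq, rfl⟩
              refine ⟨a, ?_, c, hc1, hc2, heqq, rfl⟩
              by_cases haS : a < S
              · exact haS
              · exfalso
                have haE : a = S := by omega
                subst haE
                have hmC := hmono E c hc1 hc2
                omega
    · rw [if_neg hcond]
      rw [not_and_or] at hcond
      by_cases hs : s < 0
      · have h0 : (s + 1).toNat = 0 := by omega
        rw [h0, matchList_zero]
        rfl
      · have hee : e = (cum.length : Int) := by rcases hcond with h | h <;> omega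
        subst hee
        rw [show ((cum.length : Int)).toNat = cum.length by omega, matchList_end]
        rfl

-- when no split exists for this mid, A's walk never updates the running maximum
lemma walk_nomatch (cum : List Int) (pm : Int) (mid : Nat)
    (hnm : ∀ a c : Nat, a < mid → mid < c → c < cum.length →
      cum.getD mid 0 - cum.getD a 0 ≠ cum.getD c 0 - cum.getD mid 0) :
    ∀ (fuel : Nat) (s e m : Int), s ≤ (mid : Int) - 1 → (mid : Int) + 1 ≤ e →
      innerA cum pm (mid : Int) fuel s e m = m := by
  intro fuel
  induction fuel with
  | zero => intro s e m _ _; rfl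
  | succ fuel ih =>
    intro s e m hs he
    rw [innerA]
    by_cases hcond : 0 ≤ s ∧ e < (cum.length : Int)
    · obtain ⟨hs0, hen⟩ := hcond
      rw [if_pos ⟨hs0, hen⟩]
      obtain ⟨S, rfl⟩ : ∃ S : Nat, s = (S : Int) := ⟨s.toNat, by omega⟩
      obtain ⟨E, rfl⟩ : ∃ E : Nat, e = (E : Int) := ⟨e.toNat, by omega⟩
      rw [PySem.List.pyGetD_natCast, PySem.List.pyGetD_natCast, PySem.List.pyGetD_natCast]
      dsimp only
      by_cases hbreak : cum.getD mid 0 - cum.getD S 0 > pm ∨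
          cum.getD E 0 - cum.getD mid 0 > pm
      · rw [if_pos hbreak]
      · rw [if_neg hbreak]
        have hne := hnm S E (by omega) (by omega) (by omega)
        rw [if_neg hne]
        by_cases hgt : cum.getD mid 0 - cum.getD S 0 > cum.getD E 0 - cum.getD mid 0
        · rw [if_pos hgt]
          exact ih (S : Int) ((E : Int) + 1) m hs (by omega)
        · rw [if_neg hgt]
          exact ih ((S : Int) - 1) (E : Int) m (by omega) he
    · rw [if_neg hcond]

lemma foldl_keep {α β : Type} (l : List α) (init : β) :
    l.foldl (fun acc _ => acc) init = init := by
  induction l generalizing init with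
  | nil => rfl
  | cons x xs ih => exact ih init

-- ===== VERDICT (by name: the statement is the Claim_ definition above) =====
theorem solution_spec : Claim_equal_solution := by
  intro cookie _ hpre
  -- transport the no-split disjunct to the prefix list
  have hnm' : (∀ c < cookie.length + 1, ∀ m < c, ∀ a < m,
      (cookie.take m).sum - (cookie.take a).sum ≠ (cookie.take c).sum - (cookie.take m).sum) →
      ∀ (k a c : Nat), a < k → k < c → c < (pyCum cookie).length →
      (pyCum cookie).getD k 0 - (pyCum cookie).getD a 0
        ≠ (pyCum cookie).getD c 0 - (pyCum cookie).getD k 0 := by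
    intro h k a c ha hc hcn
    rw [cum_length] at hcn
    rw [cum_getD _ _ (by omega), cum_getD _ _ (by omega), cum_getD _ _ (by omega)]
    exact h c (by omega) k (by omega) a (by omega)
  unfold Spec_solution solution solution_alt
  dsimp only
  rw [pyCumB_eq]
  rw [PySem.List.enumerate_eq_map_pyRange _ 0]
  simp only [PySem.List.len_eq, List.foldl_map]
  rw [PySem.List.pyRange_zero_natCast, List.foldl_map]
  rcases hpre with hpre | hnm
  case inr =>
    -- no split exists: neither side ever updates the accumulator
    have hnm2 := hnm' hnm
    refine Eq.trans (b := (0 : Int)) ?_ ?_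
    · rw [PySem.List.foldl_congr_mem _ _ (fun (acc : Int) _ => acc) 0 ?_]
      · exact foldl_keep _ _
      intro m k hk
      have hkn : k < (pyCum cookie).length := List.mem_range.1 hk
      exact walk_nomatch (pyCum cookie) _ k (fun a c ha hc hcn => hnm2 k a c ha hc hcn)
        (pyCum cookie).length ((k : Int) - 1) ((k : Int) + 1) m (by omega) (by omega)
    · symm
      rw [PySem.List.foldl_congr_mem _ _ (fun (acc : Int) _ => acc) 0 ?_]
      · exact foldl_keep _ _
      intro m k hk
      have hkn : k < (pyCum cookie).length := List.mem_range.1 hk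
      dsimp only
      rw [show PySem.Set.inter
          (PySem.Set.ofList ((List.range k).map (fun (a : Nat) =>
            PySem.List.pyGetD (pyCum cookie) ((k : Nat) : Int) 0
              - PySem.List.pyGetD (pyCum cookie) ((a : Nat) : Int) 0)))
          (PySem.Set.ofList ((PySem.List.pyRange ((k : Int) + 1) ((pyCum cookie).length : Int)).map
            (fun c => PySem.List.pyGetD (pyCum cookie) c 0
              - PySem.List.pyGetD (pyCum cookie) ((k : Nat) : Int) 0))) = [] from ?_]
      · rfl
      rw [List.eq_nil_iff_forall_not_mem]
      intro x hx
      rw [PySem.Set.mem_inter, PySem.Set.mem_ofList, PySem.Set.mem_ofList] at hx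
      simp only [List.mem_map, List.mem_range, PySem.List.mem_pyRange_one,
        PySem.List.pyGetD_natCast] at hx
      obtain ⟨⟨a, ha, hax⟩, ⟨c, ⟨hc1, hc2⟩, hcx⟩⟩ := hx
      rw [show c = ((c.toNat : Nat) : Int) by omega, PySem.List.pyGetD_natCast] at hcx
      exact hnm2 k a c.toNat ha (by omega) (by omega) (by omega)
  apply PySem.List.foldl_congr_mem
  intro best k hk
  have hkn : k < (pyCum cookie).length := List.mem_range.1 hk
  -- A side: the walk equals the fold of max over the full match set
  have hA := walkA (pyCum cookie)
    (PySem.Int.floordiv ((PySem.List.pyGet? (pyCum cookie) (-1)).getD 0) 2) k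
    (fun i j hij hj => cum_mono cookie hpre i j hij hj)
    (fun a c ha hc hcn heq => cum_pm cookie hpre a k c ha hc hcn heq)
    (pyCum cookie).length ((k : Int) - 1) ((k : Int) + 1) best
    (by omega) (by omega) (by omega) (by exact_mod_cast hkn) (by omega)
  rw [show ((k : Int) - 1 + 1).toNat = k by omega,
      show ((k : Int) + 1).toNat = k + 1 by omega] at hA
  rw [hA]
  -- B side: the intersection fold equals the same fold of max
  rw [PySem.List.foldl_congr_mem _ _ max best (fun b v _ => ite_gt_eq_max b v)]
  apply (foldMax_congr _ _ best ?_).symm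
  intro x
  rw [mem_matchList _ _ _ _ (by omega)]
  rw [PySem.Set.mem_inter, PySem.Set.mem_ofList, PySem.Set.mem_ofList]
  rw [List.map_congr_left (fun (a : Nat) _ => by
    rw [PySem.List.pyGetD_natCast, PySem.List.pyGetD_natCast] :
    ∀ (a : Nat), a ∈ List.range k →
      PySem.List.pyGetD (pyCum cookie) ((k : Nat) : Int) 0
        - PySem.List.pyGetD (pyCum cookie) ((a : Nat) : Int) 0
      = (pyCum cookie).getD k 0 - (pyCum cookie).getD a 0)]
  simp only [List.mem_map, List.mem_range, PySem.List.mem_pyRange_one,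
    PySem.List.pyGetD_natCast]
  constructor
  · rintro ⟨⟨a, ha, hax⟩, ⟨c, ⟨hc1, hc2⟩, hcx⟩⟩
    rw [show c = ((c.toNat : Nat) : Int) by omega, PySem.List.pyGetD_natCast] at hcx
    exact ⟨a, ha, c.toNat, by omega, by omega, by omega, by omega⟩
  · rintro ⟨a, ha, c, hc1, hc2, heq, rfl⟩
    refine ⟨⟨a, ha, rfl⟩, ⟨(c : Int), ⟨by omega, by omega⟩, ?_⟩⟩
    rw [PySem.List.pyGetD_natCast]
    omega
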